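-- pv_equiv track=rewrite | github.com/Shivendra0712/AI | 2048puzzleGreedy.py | heuClose
-- ===== SOURCE A (Python) =====
-- def heuClose(B):
--     Hr=0
--     for i in range(4):
--         R=[j for j in range(4) if B[i][j]!=0]
--         for j in range(len(R)-1):
--             if B[i][R[j]]==B[i][R[j+1]]:
--                 j+=1
--                 Hr+=2*B[i][R[j]]
--     Hc=0
--     for j in range(4):
--         C=[i for i in range(4) if B[i][j]!=0]
--         for i in range(len(C)-1):
--             if B[C[i]][j]==B[C[i+1]][j]:
--                 i+=1
--                 Hc+=2*B[C[i]][j]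
--     return Hc+Hr
-- ===== SOURCE B (Python) =====
-- def heuClose(B):
--     col_last = [None] * 4
--     h = 0
--     for i in range(4):
--         row = B[i]
--         row_last = None
--         for j in range(4):
--             v = row[j]
--             if v != 0:
--                 if row_last == v:
--                     h += 2 * v
--                 if col_last[j] == v:
--                     h += 2 * v
--                 row_last = v
--                 col_last[j] = v
--     return h
-- ===== Notes on version B (the rewrite author's own statement) =====
-- stated objective: alternative
-- what changed: Replaces A's two staged passes (each building an index list R/C of nonzero positions per line and then scanning consecutive index pairs with double indexing) by ONE streaming row-major pass over the 16 cells that keeps a last-nonzero carry per row and per column and adds 2*v whenever the current nonzero cell equals its carry; no index lists and no separate column pass exist in B.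
import Mathlib
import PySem

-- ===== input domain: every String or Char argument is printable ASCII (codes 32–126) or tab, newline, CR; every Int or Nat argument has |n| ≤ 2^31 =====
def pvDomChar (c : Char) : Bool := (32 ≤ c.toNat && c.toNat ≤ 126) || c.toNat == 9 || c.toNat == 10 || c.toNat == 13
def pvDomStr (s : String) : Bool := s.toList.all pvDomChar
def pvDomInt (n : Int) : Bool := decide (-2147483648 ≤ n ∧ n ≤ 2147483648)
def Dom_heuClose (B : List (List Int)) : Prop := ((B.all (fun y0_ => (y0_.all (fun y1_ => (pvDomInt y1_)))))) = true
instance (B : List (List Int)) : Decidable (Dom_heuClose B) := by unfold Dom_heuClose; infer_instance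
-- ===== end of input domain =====

-- B replaces A's two staged passes over per-line index lists by one row-major streaming pass
-- with a last-nonzero carry per row and per column (objective: alternative; same values as A).

-- ===== PORT A =====
-- B[i][j]; exact whenever i,j are in range (guaranteed by Pre_heuClose for the indices used)
def getc (B : List (List Int)) (i j : Int) : Int :=
  (PySem.List.pyGet? ((PySem.List.pyGet? B i).getD []) j).getD 0

def heuClose (B : List (List Int)) : Int :=
  let Hr := (PySem.List.pyRange 0 4 1).foldl (fun Hr i =>
    let R := (PySem.List.pyRange 0 4 1).filter (fun j => getc B i j ≠ 0)
    (PySem.List.pyRange 0 ((R.length : Int) - 1) 1).foldl (fun Hr j =>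
      if getc B i ((PySem.List.pyGet? R j).getD 0) = getc B i ((PySem.List.pyGet? R (j + 1)).getD 0)
      then Hr + 2 * getc B i ((PySem.List.pyGet? R (j + 1)).getD 0) else Hr) Hr) 0
  let Hc := (PySem.List.pyRange 0 4 1).foldl (fun Hc j =>
    let C := (PySem.List.pyRange 0 4 1).filter (fun i => getc B i j ≠ 0)
    (PySem.List.pyRange 0 ((C.length : Int) - 1) 1).foldl (fun Hc i =>
      if getc B ((PySem.List.pyGet? C i).getD 0) j = getc B ((PySem.List.pyGet? C (i + 1)).getD 0) j
      then Hc + 2 * getc B ((PySem.List.pyGet? C (i + 1)).getD 0) j else Hc) Hc) 0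
  Hc + Hr

-- ===== PORT B =====
-- one cell of Source B's inner loop: state = (row_last, col_last, h); col_last[j] reads/writes are
-- exact under Pre_heuClose (j ∈ 0..3, col_last has length 4)
def cellStep (row : List Int) (s : Option Int × List (Option Int) × Int) (j : Int) :
    Option Int × List (Option Int) × Int :=
  let v := (PySem.List.pyGet? row j).getD 0
  if v ≠ 0 then
    let h1 := if s.1 = some v then s.2.2 + 2 * v else s.2.2
    let h2 := if PySem.List.pyGetD s.2.1 j none = some v then h1 + 2 * v else h1
    (some v, PySem.List.pySetD s.2.1 j (some v), h2)
  else s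

-- one row of Source B's outer loop: row_last starts at None, col_last and h are threaded through
def rowPass (row : List Int) (st : List (Option Int) × Int) : List (Option Int) × Int :=
  let r := (PySem.List.pyRange 0 4 1).foldl (cellStep row) ((none : Option Int), st.1, st.2)
  (r.2.1, r.2.2)

def heuClose_alt (B : List (List Int)) : Int :=
  let res := (PySem.List.pyRange 0 4 1).foldl
    (fun st i => rowPass ((PySem.List.pyGet? B i).getD []) st)
    (List.replicate 4 (none : Option Int), (0 : Int))
  res.2

-- ===== PRECONDITION & SPEC =====
-- Pre_: exactly the inputs where Python A returns (it reads B[i][j] for all i,j < 4, so the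
-- first four rows must exist and each have at least four entries; extra rows/cells are ignored).
def Pre_heuClose (B : List (List Int)) : Prop :=
  4 ≤ B.length ∧ ∀ r ∈ B.take 4, 4 ≤ r.length
instance (B : List (List Int)) : Decidable (Pre_heuClose B) := by unfold Pre_heuClose; infer_instance

def pvWitness_heuClose : List (List Int) := [[2,2,0,4],[0,0,0,0],[2,0,2,4],[4,4,2,2]]

def Spec_heuClose (B : List (List Int)) (out : Int) : Prop := out = heuClose_alt B
instance (B : List (List Int)) (out : Int) : Decidable (Spec_heuClose B out) := by unfold Spec_heuClose; infer_instance

-- ===== CLAIM (what is proved, stated in full; the proofs are below) =====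
def Claim_equal_heuClose : Prop := ∀ (B : List (List Int)), Dom_heuClose B → Pre_heuClose B → Spec_heuClose B (heuClose B)

-- ===== LEMMAS AND PROOFS =====

-- carry update and merge contribution of one cell against a carry
def upd (o : Option Int) (v : Int) : Option Int := if v ≠ 0 then some v else o
def contrib (o : Option Int) (v : Int) : Int := if v ≠ 0 ∧ o = some v then 2 * v else 0

-- score of one line as a carry chain: adjacent equal pairs of the compacted line, doubled
def chainScore : Option Int → List Int → Int
  | _, [] => 0
  | o, v :: t => contrib o v + chainScore (upd o v) t

-- abstract form of one of A's line loops: f j is the j-th value of the line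
def lineGet (f : Int → Int) (h : Int) : Int :=
  let R := ([0, 1, 2, 3] : List Int).filter (fun j => f j ≠ 0)
  (PySem.List.pyRange 0 ((R.length : Int) - 1) 1).foldl (fun h j =>
    if f ((PySem.List.pyGet? R j).getD 0) = f ((PySem.List.pyGet? R (j + 1)).getD 0)
    then h + 2 * f ((PySem.List.pyGet? R (j + 1)).getD 0) else h) h

lemma pyRange04 : PySem.List.pyRange 0 4 1 = ([0, 1, 2, 3] : List Int) := by decide

lemma heuClose_expand (B : List (List Int)) :
    heuClose B =
      lineGet (fun i => getc B i 3) (lineGet (fun i => getc B i 2)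
        (lineGet (fun i => getc B i 1) (lineGet (fun i => getc B i 0) 0)))
      + lineGet (fun j => getc B 3 j) (lineGet (fun j => getc B 2 j)
        (lineGet (fun j => getc B 1 j) (lineGet (fun j => getc B 0 j) 0))) := by
  simp [heuClose, pyRange04, lineGet, List.foldl]

lemma foldl_ite_shift (l : List Int) (c : Int → Prop) [DecidablePred c] (g : Int → Int) (a : Int) :
    l.foldl (fun acc j => if c j then acc + g j else acc) a
      = a + l.foldl (fun acc j => if c j then acc + g j else acc) 0 := by
  induction l generalizing a with
  | nil => simp
  | cons x t ih =>
      simp only [List.foldl_cons]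
      by_cases hx : c x
      · simp only [if_pos hx]
        rw [ih (a + g x), ih (0 + g x)]
        ring
      · simp only [if_neg hx]
        rw [ih a]

lemma lineGet_shift (f : Int → Int) (h : Int) : lineGet f h = h + lineGet f 0 := by
  unfold lineGet
  exact foldl_ite_shift _ _ _ h

lemma pyRm1 : PySem.List.pyRange 0 (-1) 1 = ([] : List Int) := by decide
lemma pyR0 : PySem.List.pyRange 0 0 1 = ([] : List Int) := by decide
lemma pyR1 : PySem.List.pyRange 0 1 1 = ([0] : List Int) := by decide
lemma pyR2 : PySem.List.pyRange 0 2 1 = ([0, 1] : List Int) := by decide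
lemma pyR3 : PySem.List.pyRange 0 3 1 = ([0, 1, 2] : List Int) := by decide

lemma lineGet_eq (f : Int → Int) (a b c d : Int)
    (h0 : f 0 = a) (h1 : f 1 = b) (h2 : f 2 = c) (h3 : f 3 = d) :
    lineGet f 0 = chainScore none [a, b, c, d] := by
  by_cases ha : a = 0 <;> by_cases hb : b = 0 <;> by_cases hc : c = 0 <;> by_cases hd : d = 0 <;>
    simp [lineGet, chainScore, contrib, upd, List.filter, h0, h1, h2, h3, ha, hb, hc, hd] <;>
    norm_num [pyRm1, pyR0, pyR1, pyR2, pyR3, List.foldl, PySem.List.pyGet?,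
      PySem.List.pyIdx?, h0, h1, h2, h3] <;>
    (split_ifs <;> simp_all <;> omega)

lemma lineGet_eq_add (f : Int → Int) (a b c d h : Int)
    (h0 : f 0 = a) (h1 : f 1 = b) (h2 : f 2 = c) (h3 : f 3 = d) :
    lineGet f h = h + chainScore none [a, b, c, d] := by
  rw [lineGet_shift, lineGet_eq f a b c d h0 h1 h2 h3]

lemma getc_eval (rs : List (List Int)) (i j : Nat) (row : List Int) (v : Int)
    (hr : rs[i]? = some row) (hv : row[j]? = some v) : getc rs (i : Int) (j : Int) = v := by
  simp [getc, hr, hv]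

lemma cellStep0 (row : List Int) (v : Int) (hv : (PySem.List.pyGet? row 0).getD 0 = v)
    (ro y0 y1 y2 y3 : Option Int) (h : Int) :
    cellStep row (ro, [y0, y1, y2, y3], h) 0
      = (upd ro v, [upd y0 v, y1, y2, y3], h + contrib ro v + contrib y0 v) := by
  simp only [cellStep, hv]
  by_cases hz : v = 0 <;>
    simp [upd, contrib, hz, PySem.List.pyGetD, PySem.List.pySetD,
      PySem.List.pySet?, PySem.List.pyGet?, PySem.List.pyIdx?] <;>
    split_ifs <;> simp_all

lemma cellStep1 (row : List Int) (v : Int) (hv : (PySem.List.pyGet? row 1).getD 0 = v)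
    (ro y0 y1 y2 y3 : Option Int) (h : Int) :
    cellStep row (ro, [y0, y1, y2, y3], h) 1
      = (upd ro v, [y0, upd y1 v, y2, y3], h + contrib ro v + contrib y1 v) := by
  simp only [cellStep, hv]
  by_cases hz : v = 0 <;>
    simp [upd, contrib, hz, PySem.List.pyGetD, PySem.List.pySetD,
      PySem.List.pySet?, PySem.List.pyGet?, PySem.List.pyIdx?] <;>
    split_ifs <;> simp_all

lemma cellStep2 (row : List Int) (v : Int) (hv : (PySem.List.pyGet? row 2).getD 0 = v)
    (ro y0 y1 y2 y3 : Option Int) (h : Int) :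
    cellStep row (ro, [y0, y1, y2, y3], h) 2
      = (upd ro v, [y0, y1, upd y2 v, y3], h + contrib ro v + contrib y2 v) := by
  simp only [cellStep, hv]
  by_cases hz : v = 0 <;>
    simp [upd, contrib, hz, PySem.List.pyGetD, PySem.List.pySetD,
      PySem.List.pySet?, PySem.List.pyGet?, PySem.List.pyIdx?] <;>
    split_ifs <;> simp_all

lemma cellStep3 (row : List Int) (v : Int) (hv : (PySem.List.pyGet? row 3).getD 0 = v)
    (ro y0 y1 y2 y3 : Option Int) (h : Int) :
    cellStep row (ro, [y0, y1, y2, y3], h) 3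
      = (upd ro v, [y0, y1, y2, upd y3 v], h + contrib ro v + contrib y3 v) := by
  simp only [cellStep, hv]
  by_cases hz : v = 0 <;>
    simp [upd, contrib, hz, PySem.List.pyGetD, PySem.List.pySetD,
      PySem.List.pySet?, PySem.List.pyGet?, PySem.List.pyIdx?] <;>
    split_ifs <;> simp_all

lemma pygetRow0 (a b c d : Int) (t : List Int) :
    (PySem.List.pyGet? (a :: b :: c :: d :: t) 0).getD 0 = a := by
  rw [show (0:Int) = ((0:Nat):Int) by norm_num, PySem.List.pyGet?_natCast]
  simp
lemma pygetRow1 (a b c d : Int) (t : List Int) :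
    (PySem.List.pyGet? (a :: b :: c :: d :: t) 1).getD 0 = b := by
  rw [show (1:Int) = ((1:Nat):Int) by norm_num, PySem.List.pyGet?_natCast]
  simp
lemma pygetRow2 (a b c d : Int) (t : List Int) :
    (PySem.List.pyGet? (a :: b :: c :: d :: t) 2).getD 0 = c := by
  rw [show (2:Int) = ((2:Nat):Int) by norm_num, PySem.List.pyGet?_natCast]
  simp
lemma pygetRow3 (a b c d : Int) (t : List Int) :
    (PySem.List.pyGet? (a :: b :: c :: d :: t) 3).getD 0 = d := by
  rw [show (3:Int) = ((3:Nat):Int) by norm_num, PySem.List.pyGet?_natCast]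
  simp

-- one application of Source B's inner loop on an explicit row and explicit column carries
lemma rowPass_eval (a b c d : Int) (t : List Int) (x0 x1 x2 x3 : Option Int) (h : Int) :
    rowPass (a :: b :: c :: d :: t) ([x0, x1, x2, x3], h)
      = ([upd x0 a, upd x1 b, upd x2 c, upd x3 d],
         h + contrib none a + contrib x0 a
           + contrib (upd none a) b + contrib x1 b
           + contrib (upd (upd none a) b) c + contrib x2 c
           + contrib (upd (upd (upd none a) b) c) d + contrib x3 d) := by
  simp only [rowPass, pyRange04, List.foldl]
  rw [cellStep0 _ a (pygetRow0 a b c d t), cellStep1 _ b (pygetRow1 a b c d t),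
    cellStep2 _ c (pygetRow2 a b c d t), cellStep3 _ d (pygetRow3 a b c d t)]

-- a line's chain score splits into the per-cell carry contributions
lemma chain4 (p q r s : Int) :
    chainScore none [p, q, r, s]
      = contrib none p + contrib (upd none p) q + contrib (upd (upd none p) q) r
        + contrib (upd (upd (upd none p) q) r) s := by
  simp [chainScore]
  ring

lemma pygetM (r0 r1 r2 r3 : List Int) (rest : List (List Int)) :
    ((PySem.List.pyGet? (r0 :: r1 :: r2 :: r3 :: rest) 0).getD [] = r0)
    ∧ ((PySem.List.pyGet? (r0 :: r1 :: r2 :: r3 :: rest) 1).getD [] = r1)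
    ∧ ((PySem.List.pyGet? (r0 :: r1 :: r2 :: r3 :: rest) 2).getD [] = r2)
    ∧ ((PySem.List.pyGet? (r0 :: r1 :: r2 :: r3 :: rest) 3).getD [] = r3) := by
  refine ⟨?_, ?_, ?_, ?_⟩
  · rw [show (0:Int) = ((0:Nat):Int) by norm_num, PySem.List.pyGet?_natCast]; simp
  · rw [show (1:Int) = ((1:Nat):Int) by norm_num, PySem.List.pyGet?_natCast]; simp
  · rw [show (2:Int) = ((2:Nat):Int) by norm_num, PySem.List.pyGet?_natCast]; simp
  · rw [show (3:Int) = ((3:Nat):Int) by norm_num, PySem.List.pyGet?_natCast]; simp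

-- ===== VERDICT (by name: the statement is the Claim_ definition above) =====
theorem heuClose_spec : Claim_equal_heuClose := by
  intro B _ hPre
  obtain ⟨hlen, hrows⟩ := hPre
  match B, hlen with
  | r0 :: r1 :: r2 :: r3 :: rest, _ =>
    have h0 : 4 ≤ r0.length := hrows r0 (by simp)
    have h1 : 4 ≤ r1.length := hrows r1 (by simp)
    have h2 : 4 ≤ r2.length := hrows r2 (by simp)
    have h3 : 4 ≤ r3.length := hrows r3 (by simp)
    match r0, h0 with
    | a0 :: a1 :: a2 :: a3 :: t0, _ =>
    match r1, h1 with
    | b0 :: b1 :: b2 :: b3 :: t1, _ =>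
    match r2, h2 with
    | c0 :: c1 :: c2 :: c3 :: t2, _ =>
    match r3, h3 with
    | d0 :: d1 :: d2 :: d3 :: t3, _ =>
      show Spec_heuClose _ (heuClose _)
      unfold Spec_heuClose
      rw [heuClose_expand]
      rw [lineGet_eq_add (fun j => getc ((a0 :: a1 :: a2 :: a3 :: t0) :: (b0 :: b1 :: b2 :: b3 :: t1) :: (c0 :: c1 :: c2 :: c3 :: t2) :: (d0 :: d1 :: d2 :: d3 :: t3) :: rest) 0 j) a0 a1 a2 a3 _ (getc_eval _ 0 0 (a0 :: a1 :: a2 :: a3 :: t0) a0 (by simp) (by simp)) (getc_eval _ 0 1 (a0 :: a1 :: a2 :: a3 :: t0) a1 (by simp) (by simp)) (getc_eval _ 0 2 (a0 :: a1 :: a2 :: a3 :: t0) a2 (by simp) (by simp)) (getc_eval _ 0 3 (a0 :: a1 :: a2 :: a3 :: t0) a3 (by simp) (by simp))]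
      rw [lineGet_eq_add (fun j => getc ((a0 :: a1 :: a2 :: a3 :: t0) :: (b0 :: b1 :: b2 :: b3 :: t1) :: (c0 :: c1 :: c2 :: c3 :: t2) :: (d0 :: d1 :: d2 :: d3 :: t3) :: rest) 1 j) b0 b1 b2 b3 _ (getc_eval _ 1 0 (b0 :: b1 :: b2 :: b3 :: t1) b0 (by simp) (by simp)) (getc_eval _ 1 1 (b0 :: b1 :: b2 :: b3 :: t1) b1 (by simp) (by simp)) (getc_eval _ 1 2 (b0 :: b1 :: b2 :: b3 :: t1) b2 (by simp) (by simp)) (getc_eval _ 1 3 (b0 :: b1 :: b2 :: b3 :: t1) b3 (by simp) (by simp))]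
      rw [lineGet_eq_add (fun j => getc ((a0 :: a1 :: a2 :: a3 :: t0) :: (b0 :: b1 :: b2 :: b3 :: t1) :: (c0 :: c1 :: c2 :: c3 :: t2) :: (d0 :: d1 :: d2 :: d3 :: t3) :: rest) 2 j) c0 c1 c2 c3 _ (getc_eval _ 2 0 (c0 :: c1 :: c2 :: c3 :: t2) c0 (by simp) (by simp)) (getc_eval _ 2 1 (c0 :: c1 :: c2 :: c3 :: t2) c1 (by simp) (by simp)) (getc_eval _ 2 2 (c0 :: c1 :: c2 :: c3 :: t2) c2 (by simp) (by simp)) (getc_eval _ 2 3 (c0 :: c1 :: c2 :: c3 :: t2) c3 (by simp) (by simp))]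
      rw [lineGet_eq_add (fun j => getc ((a0 :: a1 :: a2 :: a3 :: t0) :: (b0 :: b1 :: b2 :: b3 :: t1) :: (c0 :: c1 :: c2 :: c3 :: t2) :: (d0 :: d1 :: d2 :: d3 :: t3) :: rest) 3 j) d0 d1 d2 d3 _ (getc_eval _ 3 0 (d0 :: d1 :: d2 :: d3 :: t3) d0 (by simp) (by simp)) (getc_eval _ 3 1 (d0 :: d1 :: d2 :: d3 :: t3) d1 (by simp) (by simp)) (getc_eval _ 3 2 (d0 :: d1 :: d2 :: d3 :: t3) d2 (by simp) (by simp)) (getc_eval _ 3 3 (d0 :: d1 :: d2 :: d3 :: t3) d3 (by simp) (by simp))]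
      rw [lineGet_eq_add (fun i => getc ((a0 :: a1 :: a2 :: a3 :: t0) :: (b0 :: b1 :: b2 :: b3 :: t1) :: (c0 :: c1 :: c2 :: c3 :: t2) :: (d0 :: d1 :: d2 :: d3 :: t3) :: rest) i 0) a0 b0 c0 d0 _ (getc_eval _ 0 0 (a0 :: a1 :: a2 :: a3 :: t0) a0 (by simp) (by simp)) (getc_eval _ 1 0 (b0 :: b1 :: b2 :: b3 :: t1) b0 (by simp) (by simp)) (getc_eval _ 2 0 (c0 :: c1 :: c2 :: c3 :: t2) c0 (by simp) (by simp)) (getc_eval _ 3 0 (d0 :: d1 :: d2 :: d3 :: t3) d0 (by simp) (by simp))]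
      rw [lineGet_eq_add (fun i => getc ((a0 :: a1 :: a2 :: a3 :: t0) :: (b0 :: b1 :: b2 :: b3 :: t1) :: (c0 :: c1 :: c2 :: c3 :: t2) :: (d0 :: d1 :: d2 :: d3 :: t3) :: rest) i 1) a1 b1 c1 d1 _ (getc_eval _ 0 1 (a0 :: a1 :: a2 :: a3 :: t0) a1 (by simp) (by simp)) (getc_eval _ 1 1 (b0 :: b1 :: b2 :: b3 :: t1) b1 (by simp) (by simp)) (getc_eval _ 2 1 (c0 :: c1 :: c2 :: c3 :: t2) c1 (by simp) (by simp)) (getc_eval _ 3 1 (d0 :: d1 :: d2 :: d3 :: t3) d1 (by simp) (by simp))]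
      rw [lineGet_eq_add (fun i => getc ((a0 :: a1 :: a2 :: a3 :: t0) :: (b0 :: b1 :: b2 :: b3 :: t1) :: (c0 :: c1 :: c2 :: c3 :: t2) :: (d0 :: d1 :: d2 :: d3 :: t3) :: rest) i 2) a2 b2 c2 d2 _ (getc_eval _ 0 2 (a0 :: a1 :: a2 :: a3 :: t0) a2 (by simp) (by simp)) (getc_eval _ 1 2 (b0 :: b1 :: b2 :: b3 :: t1) b2 (by simp) (by simp)) (getc_eval _ 2 2 (c0 :: c1 :: c2 :: c3 :: t2) c2 (by simp) (by simp)) (getc_eval _ 3 2 (d0 :: d1 :: d2 :: d3 :: t3) d2 (by simp) (by simp))]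
      rw [lineGet_eq_add (fun i => getc ((a0 :: a1 :: a2 :: a3 :: t0) :: (b0 :: b1 :: b2 :: b3 :: t1) :: (c0 :: c1 :: c2 :: c3 :: t2) :: (d0 :: d1 :: d2 :: d3 :: t3) :: rest) i 3) a3 b3 c3 d3 _ (getc_eval _ 0 3 (a0 :: a1 :: a2 :: a3 :: t0) a3 (by simp) (by simp)) (getc_eval _ 1 3 (b0 :: b1 :: b2 :: b3 :: t1) b3 (by simp) (by simp)) (getc_eval _ 2 3 (c0 :: c1 :: c2 :: c3 :: t2) c3 (by simp) (by simp)) (getc_eval _ 3 3 (d0 :: d1 :: d2 :: d3 :: t3) d3 (by simp) (by simp))]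
      have hrep : List.replicate 4 (none : Option Int) = [none, none, none, none] := by decide
      have halt : heuClose_alt ((a0 :: a1 :: a2 :: a3 :: t0) :: (b0 :: b1 :: b2 :: b3 :: t1) :: (c0 :: c1 :: c2 :: c3 :: t2) :: (d0 :: d1 :: d2 :: d3 :: t3) :: rest)
          = (rowPass (d0 :: d1 :: d2 :: d3 :: t3) (rowPass (c0 :: c1 :: c2 :: c3 :: t2)
              (rowPass (b0 :: b1 :: b2 :: b3 :: t1) (rowPass (a0 :: a1 :: a2 :: a3 :: t0)
                ([none, none, none, none], 0))))).2 := by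
        simp only [heuClose_alt, pyRange04, List.foldl, hrep]
        rw [(pygetM _ _ _ _ rest).1, (pygetM _ _ _ _ rest).2.1,
          (pygetM _ _ _ _ rest).2.2.1, (pygetM _ _ _ _ rest).2.2.2]
      rw [halt, rowPass_eval, rowPass_eval, rowPass_eval, rowPass_eval]
      simp only [chain4]
      have hnone : ∀ v : Int, contrib none v = 0 := by
        intro v; simp [contrib]
      simp only [hnone]
      ring
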